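-- pv_equiv track=rewrite | github.com/hatch8889/aoc2021 | day12/day12.py | can_visit_again
-- ===== SOURCE A (Python) =====
-- def can_visit_again(visited):
--     double_visit = 0
--     for f in filter(lambda v: v.islower(), visited):
--         if visited.count(f) > 1:
--             double_visit += 1
--
--     # set to 1 for part1
--     if double_visit > 2:
--         return False
--     return True
-- ===== SOURCE B (Python) =====
-- def can_visit_again(visited):
--     s = sorted(visited)
--     total = 0
--     i = 0
--     n = len(s)
--     while i < n:
--         j = i
--         while j < n and s[j] == s[i]:
--             j += 1
--         run = j - i
--         if s[i].islower() and run > 1: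
--             total += run
--         i = j
--     return total <= 2
-- ===== Notes on version B (the rewrite author's own statement) =====
-- stated objective: faster
-- what changed: Replaces A's per-lowercase-element repeated visited.count scan (quadratic repeated scanning) with a sort of the list followed by a single pass over runs of equal strings, adding each run's length when the key is lowercase and the run is longer than 1, then testing the total against 2.
import Mathlib
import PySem

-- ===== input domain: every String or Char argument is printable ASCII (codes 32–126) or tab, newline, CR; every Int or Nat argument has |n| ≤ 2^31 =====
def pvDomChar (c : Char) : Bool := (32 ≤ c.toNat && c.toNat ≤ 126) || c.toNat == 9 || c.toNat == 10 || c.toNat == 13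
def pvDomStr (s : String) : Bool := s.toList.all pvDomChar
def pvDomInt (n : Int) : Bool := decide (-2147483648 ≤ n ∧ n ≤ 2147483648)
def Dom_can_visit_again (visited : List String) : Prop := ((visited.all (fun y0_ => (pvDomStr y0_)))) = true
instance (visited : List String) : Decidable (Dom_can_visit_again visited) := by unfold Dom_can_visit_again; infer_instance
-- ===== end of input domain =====

-- B replaces A's per-element repeated .count scans by one sort followed by a single
-- grouped pass over equal runs (objective: alternative algorithm).

-- ===== PORT A =====
-- str.islower(): at least one lowercase letter and no uppercase letter — exact on the
-- ASCII domain (where cased characters are exactly the letters); used by both ports.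
def pyStrIslower (s : String) : Bool :=
  s.toList.any PySem.Chars.islower && s.toList.all (fun c => !PySem.Chars.isupper c)

def can_visit_again (visited : List String) : Bool :=
  let double_visit : Int :=
    (visited.filter (fun v => pyStrIslower v)).foldl
      (fun acc f => if PySem.List.count visited f > 1 then acc + 1 else acc) 0
  if double_visit > 2 then false else true

-- ===== PORT B =====
-- the grouped pass of Source B: at each position take the run of equal strings
-- (inner `while s[j] == s[i]`), add its length when the key is lowercase and run > 1
def runTotal : List String → Nat
  | [] => 0
  | x :: xs =>
    (if pyStrIslower x && (xs.takeWhile (· == x)).length + 1 > 1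
       then (xs.takeWhile (· == x)).length + 1 else 0)
      + runTotal (xs.dropWhile (· == x))
termination_by l => l.length
decreasing_by
  have := List.length_dropWhile_le (· == x) xs
  simpa using Nat.lt_succ_of_le this

def can_visit_again_alt (visited : List String) : Bool :=
  decide (runTotal (PySem.List.sorted visited (fun x => x) false) ≤ 2)

-- ===== PRECONDITION & SPEC =====
def Spec_can_visit_again (visited : List String) (out : Bool) : Prop := out = can_visit_again_alt visited
instance (visited : List String) (out : Bool) : Decidable (Spec_can_visit_again visited out) := by unfold Spec_can_visit_again; infer_instance

-- ===== CLAIM (what is proved, stated in full; the proofs are below) =====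
def Claim_equal_can_visit_again : Prop := ∀ (visited : List String), Dom_can_visit_again visited → Spec_can_visit_again visited (can_visit_again visited)

-- ===== LEMMAS AND PROOFS =====

-- the common measure both programs compute: the number of occurrences in `l` that are
-- lowercase and appear more than once in `base`
def dupCount (base l : List String) : Nat :=
  l.countP (fun f => pyStrIslower f && decide (1 < base.count f))

lemma countP_const_of_all_eq {l : List String} {p : String → Bool} {x : String}
    (h : ∀ y ∈ l, y = x) : l.countP p = if p x then l.length else 0 := by
  induction l with
  | nil => simp
  | cons a t ih =>
    have ha : a = x := h a (by simp)
    have ht : ∀ y ∈ t, y = x := fun y hy => h y (by simp [hy])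
    rw [List.countP_cons, ih ht, ha]
    by_cases hp : p x = true <;> simp [hp, List.length_cons]

-- splitting the grouped count along one run: all of `t` equals `x`, `x` is not in `d`
lemma dupCount_run_split (x : String) (t d : List String)
    (htx : ∀ y ∈ t, y = x) (hxd : x ∉ d) :
    dupCount (x :: (t ++ d)) (x :: (t ++ d))
      = (if pyStrIslower x && decide (1 < t.length + 1) then t.length + 1 else 0)
        + dupCount d d := by
  have hcount_x : (x :: (t ++ d)).count x = t.length + 1 := by
    have h1 : t.count x = t.length :=
      List.count_eq_length.mpr (fun y hy => by simp [htx y hy])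
    have h2 : d.count x = 0 := List.count_eq_zero.mpr hxd
    rw [List.count_cons_self, List.count_append, h1, h2]
  have hcount_d : ∀ y ∈ d, (x :: (t ++ d)).count y = d.count y := by
    intro y hy
    have hyx : y ≠ x := fun h => hxd (h ▸ hy)
    have h1 : t.count y = 0 :=
      List.count_eq_zero.mpr (fun hmem => hyx (htx y hmem))
    simp [List.count_append, h1, Ne.symm hyx]
  show dupCount (x :: (t ++ d)) ((x :: t) ++ d) = _
  unfold dupCount
  rw [List.countP_append]
  have hall : ∀ y ∈ (x :: t), y = x := by
    intro y hy
    rcases List.mem_cons.mp hy with h | h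
    · exact h
    · exact htx y h
  rw [countP_const_of_all_eq hall]
  have hrest : d.countP (fun f => pyStrIslower f && decide (1 < (x :: (t ++ d)).count f))
      = d.countP (fun f => pyStrIslower f && decide (1 < d.count f)) :=
    List.countP_congr (fun y hy => by rw [hcount_d y hy])
  rw [hrest, hcount_x, List.length_cons]

lemma runTotal_eq_dupCount :
    ∀ n (l : List String), l.length ≤ n → l.Pairwise (· ≤ ·) →
      runTotal l = dupCount l l := by
  intro n
  induction n with
  | zero =>
    intro l hl _
    have : l = [] := List.length_eq_zero_iff.mp (Nat.le_zero.mp hl)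
    subst this; simp [runTotal, dupCount]
  | succ n ih =>
    intro l hl hp
    match l with
    | [] => simp [runTotal, dupCount]
    | x :: xs =>
      -- every element of the run equals x
      have htx : ∀ y ∈ xs.takeWhile (· == x), y = x := by
        intro y hy
        exact eq_of_beq (List.mem_takeWhile_imp (p := (· == x)) (l := xs) hy)
      -- x does not occur in the remainder (the run head differs and the rest is sorted)
      have hxd : x ∉ xs.dropWhile (· == x) := by
        intro hmem
        cases hdd : xs.dropWhile (· == x) with
        | nil => rw [hdd] at hmem; simp at hmem
        | cons d0 d' =>
          rw [hdd] at hmem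
          have hd0 : ¬ (d0 == x) = true := by
            have h := List.head?_dropWhile_not (p := (· == x)) (l := xs)
            rw [hdd] at h; simpa using h
          have hd0x : d0 ≠ x := by simpa using hd0
          have hsort : ∀ y ∈ xs, x ≤ y := (List.pairwise_cons.mp hp).1
          have hxd0 : x ≤ d0 := by
            refine hsort d0 ((List.dropWhile_sublist (l := xs) (p := (· == x))).subset ?_)
            rw [hdd]; simp
          have hpd : (d0 :: d').Pairwise (· ≤ ·) := by
            have h := ((List.pairwise_cons.mp hp).2).sublist
              (List.dropWhile_sublist (l := xs) (p := (· == x)))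
            rw [hdd] at h; exact h
          rcases List.mem_cons.mp hmem with h0 | h'
          · exact hd0x h0.symm
          · exact hd0x (le_antisymm ((List.pairwise_cons.mp hpd).1 x h') hxd0)
      have hxs : xs.takeWhile (· == x) ++ xs.dropWhile (· == x) = xs :=
        List.takeWhile_append_dropWhile
      have hlen : (xs.dropWhile (· == x)).length ≤ n := by
        have h1 := List.length_dropWhile_le (· == x) xs
        simp only [List.length_cons] at hl
        omega
      have hpd : (xs.dropWhile (· == x)).Pairwise (· ≤ ·) :=
        ((List.pairwise_cons.mp hp).2).sublist (List.dropWhile_sublist (l := xs) (p := (· == x)))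
      rw [runTotal, ih _ hlen hpd]
      conv_rhs => rw [← hxs]
      rw [dupCount_run_split x _ _ htx hxd]

lemma alt_eq_dupCount (visited : List String) :
    can_visit_again_alt visited = decide (dupCount visited visited ≤ 2) := by
  unfold can_visit_again_alt
  have hperm : (PySem.List.sorted visited (fun x => x) false).Perm visited :=
    PySem.List.sorted_perm _ _ _
  have hpair : (PySem.List.sorted visited (fun x => x) false).Pairwise (· ≤ ·) := by
    simpa using PySem.List.sorted_pairwise visited (fun x => x)
  rw [runTotal_eq_dupCount (PySem.List.sorted visited (fun x => x) false).length _ le_rfl hpair]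
  have h2 : dupCount (PySem.List.sorted visited (fun x => x) false)
      (PySem.List.sorted visited (fun x => x) false) = dupCount visited visited := by
    unfold dupCount
    rw [List.countP_congr (q := fun f => pyStrIslower f && decide (1 < visited.count f))
          (fun y _ => by rw [hperm.count_eq])]
    exact hperm.countP_eq _
  rw [h2]

-- ===== VERDICT (by name: the statement is the Claim_ definition above) =====
theorem can_visit_again_spec : Claim_equal_can_visit_again := by
  intro visited _
  unfold Spec_can_visit_again can_visit_again
  rw [alt_eq_dupCount]
  simp only [PySem.List.count_eq]
  have hfold := PySem.List.foldl_ite_add_one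
      (fun f => PySem.List.count visited f > 1)
      (visited.filter (fun v => pyStrIslower v)) 0
  simp only [PySem.List.count_eq] at hfold
  simp only [hfold, zero_add, List.countP_filter]
  have hc : (List.countP (fun a => decide (PySem.List.count visited a > 1) && pyStrIslower a) visited)
      = dupCount visited visited := by
    unfold dupCount
    apply List.countP_congr
    intro y _
    simp [PySem.List.count_eq, Bool.and_comm]
  simp only [PySem.List.count_eq] at hc
  split_ifs with hgt
  · rw [hc] at hgt
    symm
    simp only [decide_eq_false_iff_not]
    omega
  · rw [hc] at hgt
    symm
    simp only [decide_eq_true_eq]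
    omega
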